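-- pv_equiv track=rewrite | github.com/racker/mriya | mriya/sf_bulk_connector.py | batch_ranges
-- ===== SOURCE A (Python) =====
-- def batch_ranges(lines_count, batch_size):
--     batches = []
--     batch_end = -1
--     left = lines_count
--     while left:
--         size = min(left,batch_size)
--         batch_begin = batch_end+1
--         batch_end = batch_begin + size -1
--         left = left - size
--         batches.append((batch_begin,batch_end))
--     return batches
-- ===== SOURCE B (Python) =====
-- def batch_ranges(lines_count, batch_size):
--     return [(i, min(i + batch_size, lines_count) - 1)
--             for i in range(0, lines_count, batch_size)]
-- ===== Notes on version B (the rewrite author's own statement) =====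
-- stated objective: simpler
-- what changed: Replaces the while loop that threads the mutable batch_end cursor and left counter with a single stride-range comprehension computing each (start, end) pair in closed form from i.
-- outside the precondition, e.g. on batch_ranges(-3, 5): A returns [(0, -4)], B returns []; on batch_ranges(0, 0): A returns [], B raises ValueError; on batch_ranges(-3, -1): A returns [(0, -4)], B returns [(0, -4), (-1, -4), (-2, -4)]
import Mathlib
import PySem

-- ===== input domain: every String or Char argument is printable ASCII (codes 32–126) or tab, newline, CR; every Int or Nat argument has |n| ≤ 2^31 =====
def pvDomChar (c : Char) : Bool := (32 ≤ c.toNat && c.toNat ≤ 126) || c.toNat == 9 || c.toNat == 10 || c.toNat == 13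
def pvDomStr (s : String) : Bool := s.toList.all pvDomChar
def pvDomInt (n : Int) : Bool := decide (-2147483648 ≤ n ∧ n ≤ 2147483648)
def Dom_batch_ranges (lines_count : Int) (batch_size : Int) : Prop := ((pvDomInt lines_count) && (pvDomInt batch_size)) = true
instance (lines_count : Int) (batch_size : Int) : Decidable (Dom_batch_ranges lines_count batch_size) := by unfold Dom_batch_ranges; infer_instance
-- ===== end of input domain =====

-- B replaces A's while loop (mutable batch_end/left accumulators) by a stride-range
-- comprehension computing each (start, end) pair in closed form; objective: simpler.

-- ===== PORT A =====
-- A's while loop as fuel recursion; on Pre_ (lines_count ≥ 0, batch_size ≥ 1) the loop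
-- runs at most lines_count iterations, so fuel lines_count.toNat + 1 is never exhausted.
def batchLoopA (fuel : Nat) (left : Int) (batch_end : Int) (batch_size : Int)
    (batches : List (Int × Int)) : List (Int × Int) :=
  match fuel with
  | 0 => batches
  | f + 1 =>
    if left = 0 then batches
    else
      let size := min left batch_size
      let batch_begin := batch_end + 1
      let batch_end' := batch_begin + size - 1
      batchLoopA f (left - size) batch_end' batch_size (batches ++ [(batch_begin, batch_end')])

def batch_ranges (lines_count : Int) (batch_size : Int) : List (Int × Int) :=
  batchLoopA (lines_count.toNat + 1) lines_count (-1) batch_size []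

-- ===== PORT B =====
def batch_ranges_alt (lines_count : Int) (batch_size : Int) : List (Int × Int) :=
  (PySem.List.pyRange 0 lines_count batch_size).map
    (fun i => (i, min (i + batch_size) lines_count - 1))

-- ===== PRECONDITION & SPEC =====
-- Pre_ restricts to the task's natural domain: a non-negative line count and a positive
-- batch size. Outside it A loops forever (lines_count > 0 with batch_size ≤ 0) or, for a
-- negative lines_count, returns the accidental single pair (0, lines_count - 1) left over
-- from one pass of the loop, which B does not reproduce.
def Pre_batch_ranges (lines_count : Int) (batch_size : Int) : Prop :=
  0 ≤ lines_count ∧ 0 < batch_size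
instance (lines_count : Int) (batch_size : Int) : Decidable (Pre_batch_ranges lines_count batch_size) := by unfold Pre_batch_ranges; infer_instance

def pvWitness_batch_ranges : Int × Int := (7, 3)

def Spec_batch_ranges (lines_count : Int) (batch_size : Int) (out : List (Int × Int)) : Prop := out = batch_ranges_alt lines_count batch_size
instance (lines_count : Int) (batch_size : Int) (out : List (Int × Int)) : Decidable (Spec_batch_ranges lines_count batch_size out) := by unfold Spec_batch_ranges; infer_instance

-- ===== CLAIM (what is proved, stated in full; the proofs are below) =====
def Claim_equal_batch_ranges : Prop := ∀ (lines_count : Int) (batch_size : Int), Dom_batch_ranges lines_count batch_size → Pre_batch_ranges lines_count batch_size → Spec_batch_ranges lines_count batch_size (batch_ranges lines_count batch_size)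

-- ===== LEMMAS AND PROOFS =====

theorem pyRange_pos_nil (a b s : Int) (hs : 0 < s) (h : b ≤ a) :
    PySem.List.pyRange a b s = [] := by
  rw [PySem.List.pyRange_of_pos a b hs]
  simp [show ¬ a < b by omega]

theorem pyRange_pos_cons (a b s : Int) (hs : 0 < s) (h : a < b) :
    PySem.List.pyRange a b s = a :: PySem.List.pyRange (a + s) b s := by
  rw [PySem.List.pyRange_of_pos a b hs, PySem.List.pyRange_of_pos (a + s) b hs]
  have hq : b - a + s - 1 = (b - a - 1) + 1 * s := by ring
  have hd : (b - a + s - 1) / s = (b - a - 1) / s + 1 := by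
    rw [hq, Int.add_mul_ediv_right _ _ (by omega : s ≠ 0)]
  have hge : 0 ≤ (b - a - 1) / s := Int.ediv_nonneg (by omega) (by omega)
  have hcount : ((b - a + s - 1) / s).toNat = ((b - a - 1) / s).toNat + 1 := by
    omega
  by_cases hab : a + s < b
  · have hq2 : b - (a + s) + s - 1 = b - a - 1 := by ring
    simp only [if_pos h, if_pos hab, hq2, hcount]
    rw [List.range_succ_eq_map, List.map_cons, List.map_map]
    refine List.cons_eq_cons.mpr ⟨by simp, ?_⟩
    apply List.map_congr_left
    intro k _
    simp [Function.comp, Nat.succ_eq_add_one]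
    ring
  · have hz : (b - a - 1) / s = 0 :=
      Int.ediv_eq_zero_of_lt (by omega) (by omega)
    simp only [if_pos h, if_neg hab, hcount, hz]
    simp

theorem batchLoopA_eq (batch_size : Int) (hbs : 0 < batch_size) :
    ∀ (fuel n : Nat), n ≤ fuel → ∀ (c : Int) (acc : List (Int × Int)),
    batchLoopA fuel (n : Int) c batch_size acc =
      acc ++ (PySem.List.pyRange (c + 1) (c + 1 + n) batch_size).map
        (fun i => (i, min (i + batch_size) (c + 1 + n) - 1)) := by
  intro fuel
  induction fuel with
  | zero =>
    intro n hn c acc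
    have : n = 0 := by omega
    subst this
    simp [batchLoopA, pyRange_pos_nil (c+1) (c+1) batch_size hbs le_rfl]
  | succ f ih =>
    intro n hn c acc
    by_cases hz : n = 0
    · subst hz
      simp [batchLoopA, pyRange_pos_nil (c+1) (c+1) batch_size hbs le_rfl]
    · have hnpos : 0 < (n : Int) := by exact_mod_cast Nat.pos_of_ne_zero hz
      have hne : (n : Int) ≠ 0 := by omega
      rw [show batchLoopA (f+1) (n : Int) c batch_size acc =
            batchLoopA f ((n : Int) - min (n : Int) batch_size)
              (c + 1 + min (n : Int) batch_size - 1) batch_size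
              (acc ++ [(c + 1, c + 1 + min (n : Int) batch_size - 1)]) from by
            simp [batchLoopA, hz]]
      by_cases hcase : batch_size ≤ (n : Int)
      · -- full batch: size = batch_size
        have hmin : min (n : Int) batch_size = batch_size := by omega
        have hrep : (n : Int) - batch_size = ((n - batch_size.toNat : Nat) : Int) := by
          omega
        have hle : n - batch_size.toNat ≤ f := by omega
        rw [hmin, hrep, ih _ hle]
        rw [pyRange_pos_cons (c+1) (c+1+n) batch_size hbs (by omega)]
        have hend : c + 1 + batch_size - 1 + 1 + ((n - batch_size.toNat : Nat) : Int)
            = c + 1 + n := by omega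
        rw [hend]
        have hstart : c + 1 + batch_size - 1 + 1 = c + 1 + batch_size := by ring
        rw [hstart]
        have hhd : min (c + 1 + batch_size) (c + 1 + (n:Int)) - 1 =
            c + 1 + batch_size - 1 := by omega
        simp
        omega
      · -- last partial batch: size = n < batch_size
        have hmin : min (n : Int) batch_size = (n : Int) := by omega
        rw [hmin]
        have hrep : (n : Int) - (n : Int) = ((0 : Nat) : Int) := by omega
        rw [hrep, ih 0 (by omega)]
        rw [pyRange_pos_cons (c+1) (c+1+n) batch_size hbs (by omega)]
        rw [pyRange_pos_nil (c+1+batch_size) (c+1+(n:Int)) batch_size hbs (by omega)]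
        rw [pyRange_pos_nil (c+1+(n:Int)-1+1) (c+1+(n:Int)-1+1+((0:Nat):Int)) batch_size hbs (by omega)]
        have hhd : min (c + 1 + batch_size) (c + 1 + (n:Int)) - 1 = c + 1 + (n:Int) - 1 := by omega
        simp
        omega

-- ===== VERDICT (by name: the statement is the Claim_ definition above) =====
theorem batch_ranges_spec : Claim_equal_batch_ranges := by
  intro lc bs _ hpre
  obtain ⟨hlc, hbs⟩ := hpre
  unfold Spec_batch_ranges batch_ranges batch_ranges_alt
  have hrep : lc = ((lc.toNat : Nat) : Int) := by omega
  have key := batchLoopA_eq bs hbs (lc.toNat + 1) lc.toNat (by omega) (-1) []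
  rw [← hrep] at key
  rw [key]
  norm_num
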